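-- pv_equiv track=rewrite | github.com/DoubleBobCat/circos_zh_Wiki | script/module/circos_markdown_init.py | clean_header
-- ===== SOURCE A (Python) =====
-- def clean_header(fList: list) -> list:
--     lession_mainBegin = None
--     img_mainBegin = None
--     config_mainBegin = None
--     for index in range(len(fList)):
--         if fList[index].startswith("[Lesson]"):
--             lession_mainBegin = index + 1
--         if fList[index].startswith("[Images]"):
--             img_mainBegin = index + 1
--         if fList[index].startswith("[Configuration]"):
--             config_mainBegin = index + 1
--             break
--     if config_mainBegin != None:
--         return fList[config_mainBegin + 1:]
--     elif img_mainBegin != None: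
--         return fList[img_mainBegin + 1:]
--     elif lession_mainBegin != None:
--         return fList[lession_mainBegin + 1:]
--     else:
--         for index in range(len(fList)):
--             if fList[index].startswith("## "):
--                 config_mainBegin = index + 1
--                 break
--         if config_mainBegin != None:
--             return fList[config_mainBegin + 1:]
--         else:
--             raise ValueError("Can't find begin in the main!")
-- ===== SOURCE B (Python) =====
-- def clean_header(fList: list) -> list:
--     def hits(prefix):
--         return [i for i, line in enumerate(fList) if line.startswith(prefix)]
--
--     config = hits("[Configuration]")
--     if config:
--         return fList[config[0] + 2:]
--     img = hits("[Images]")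
--     if img:
--         return fList[img[-1] + 2:]
--     lesson = hits("[Lesson]")
--     if lesson:
--         return fList[lesson[-1] + 2:]
--     heads = hits("## ")
--     if heads:
--         return fList[heads[0] + 2:]
--     raise ValueError("Can't find begin in the main!")
-- ===== Notes on version B (the rewrite author's own statement) =====
-- stated objective: simpler
-- what changed: Replaces A's single stateful break-loop (three accumulators plus a fallback loop) with four independent index searches: first [Configuration] hit, last [Images] hit, last [Lesson] hit, first '## ' hit, tried in A's priority order.
import Mathlib
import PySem

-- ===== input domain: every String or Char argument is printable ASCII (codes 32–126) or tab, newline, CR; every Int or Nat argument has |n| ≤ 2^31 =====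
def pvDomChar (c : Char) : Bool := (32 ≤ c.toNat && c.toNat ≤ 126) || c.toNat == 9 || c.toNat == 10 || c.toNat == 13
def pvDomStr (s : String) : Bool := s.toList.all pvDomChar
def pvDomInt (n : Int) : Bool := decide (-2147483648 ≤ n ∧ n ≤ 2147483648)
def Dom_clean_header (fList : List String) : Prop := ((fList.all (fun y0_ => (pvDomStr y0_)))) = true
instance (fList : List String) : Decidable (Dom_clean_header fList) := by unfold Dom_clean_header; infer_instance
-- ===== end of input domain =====

-- B replaces A's single stateful break-loop by four targeted index searches (simpler decomposition, same cost).

-- ===== PORT A =====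
-- the single for-loop of A: state (lession_mainBegin, img_mainBegin) and break on [Configuration]
def chLoopA : List String → Nat → Option Nat → Option Nat → Option Nat × Option Nat × Option Nat
  | [], _, les, img => (les, img, none)
  | s :: rest, i, les, img =>
    let les' := if PySem.Str.startswith s "[Lesson]" then some (i+1) else les
    let img' := if PySem.Str.startswith s "[Images]" then some (i+1) else img
    if PySem.Str.startswith s "[Configuration]" then (les', img', some (i+1))
    else chLoopA rest (i+1) les' img'

-- A's second loop: first index starting with "## ", as index+1, with break
def chLoopHH : List String → Nat → Option Nat
  | [], _ => none
  | s :: rest, i => if PySem.Str.startswith s "## " then some (i+1) else chLoopHH rest (i+1)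

def clean_header (fList : List String) : List String :=
  match chLoopA fList 0 none none with
  | (les, img, cfg) =>
    match cfg with
    | some c => fList.drop (c+1)      -- fList[c+1:], start index ≥ 0: slice = drop (exact)
    | none =>
      match img with
      | some m => fList.drop (m+1)
      | none =>
        match les with
        | some m => fList.drop (m+1)
        | none =>
          match chLoopHH fList 0 with
          | some c => fList.drop (c+1)
          | none => []                -- raise ValueError: excluded by Pre_clean_header

-- ===== PORT B =====
-- [i for i, line in enumerate(fList) if line.startswith(prefix)]
def chHits (fList : List String) (pre : String) : List Int :=
  ((PySem.List.enumerate fList).filter (fun q => PySem.Str.startswith q.2 pre)).map Prod.fst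

def clean_header_alt (fList : List String) : List String :=
  match (chHits fList "[Configuration]").head? with
  | some c => PySem.List.slice fList (some (c+2)) none
  | none =>
    match (chHits fList "[Images]").getLast? with
    | some m => PySem.List.slice fList (some (m+2)) none
    | none =>
      match (chHits fList "[Lesson]").getLast? with
      | some m => PySem.List.slice fList (some (m+2)) none
      | none =>
        match (chHits fList "## ").head? with
        | some c => PySem.List.slice fList (some (c+2)) none
        | none => []                  -- raise ValueError: excluded by Pre_clean_header

-- ===== PRECONDITION & SPEC =====
-- Pre_ excludes exactly the inputs on which A (and B) raise ValueError: no line starts with any of the four markers.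
def Pre_clean_header (fList : List String) : Prop :=
  (fList.any (fun s => PySem.Str.startswith s "[Configuration]" || PySem.Str.startswith s "[Images]"
      || PySem.Str.startswith s "[Lesson]" || PySem.Str.startswith s "## ")) = true
instance (fList : List String) : Decidable (Pre_clean_header fList) := by unfold Pre_clean_header; infer_instance
def pvWitness_clean_header : List String := (["[Configuration]", "a", "b"])

def Spec_clean_header (fList : List String) (out : List String) : Prop := out = clean_header_alt fList
instance (fList : List String) (out : List String) : Decidable (Spec_clean_header fList out) := by unfold Spec_clean_header; infer_instance

-- ===== CLAIM (what is proved, stated in full; the proofs are below) =====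
def Claim_equal_clean_header : Prop := ∀ (fList : List String), Dom_clean_header fList → Pre_clean_header fList → Spec_clean_header fList (clean_header fList)

-- ===== LEMMAS AND PROOFS =====
-- first / last matching index (proof-side characterisations)
def chFirst (p : String) : List String → Option Nat
  | [] => none
  | s :: rest => if PySem.Str.startswith s p then some 0 else (chFirst p rest).map (· + 1)

def chLast (p : String) : List String → Option Nat
  | [] => none
  | s :: rest =>
    match chLast p rest with
    | some k => some (k + 1)
    | none => if PySem.Str.startswith s p then some 0 else none

def chIdxs (p : String) : List String → List Nat
  | [] => []
  | s :: rest =>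
    if PySem.Str.startswith s p then 0 :: (chIdxs p rest).map (· + 1)
    else (chIdxs p rest).map (· + 1)

theorem chHits_eq (l : List String) (p : String) (i : Int) :
    ((PySem.List.enumerate l i).filter (fun q => PySem.Str.startswith q.2 p)).map Prod.fst
      = List.map (fun k : Nat => i + (k : Int)) (chIdxs p l) := by
  induction l generalizing i with
  | nil => simp [chIdxs, PySem.List.enumerate_nil]
  | cons s rest ih =>
    rw [PySem.List.enumerate_cons]
    simp only [PySem.Str.startswith_eq] at ih
    by_cases h : PySem.Chars.startswith s.toList p.toList = true
    · simp only [chIdxs, PySem.Str.startswith_eq, h, if_pos, List.filter_cons, List.map_cons]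
      rw [show i + ((0:Nat):Int) = i by simp, ih, List.map_map]
      exact congrArg (List.cons i) (List.map_congr_left (fun k _ => by simp [Function.comp]; omega))
    · simp only [chIdxs, PySem.Str.startswith_eq, h, List.filter_cons, Bool.false_eq_true, if_false]
      rw [ih, List.map_map]
      exact List.map_congr_left (fun k _ => by simp [Function.comp]; omega)

theorem chIdxs_head (p : String) (l : List String) : (chIdxs p l).head? = chFirst p l := by
  induction l with
  | nil => rfl
  | cons s rest ih =>
    by_cases h : PySem.Chars.startswith s.toList p.toList = true <;>
      simp [chIdxs, chFirst, h, ← ih, List.head?_map]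

theorem chGetLast_map {A B : Type} (g : A → B) (l : List A) :
    (l.map g).getLast? = l.getLast?.map g := by
  induction l with
  | nil => rfl
  | cons a t ih => rcases t with _ | ⟨b, u⟩ <;> simp_all [List.getLast?_cons_cons]

theorem chGetLast_ne_none {A : Type} (a : A) (t : List A) : (a :: t).getLast? ≠ none := by
  induction t generalizing a with
  | nil => simp
  | cons b u ih => rw [List.getLast?_cons_cons]; exact ih b

theorem chIdxs_last (p : String) (l : List String) : (chIdxs p l).getLast? = chLast p l := by
  induction l with
  | nil => rfl
  | cons s rest ih =>
    by_cases h : PySem.Str.startswith s p = true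
    · simp only [chIdxs, chLast, h, if_true]
      rcases hx : chIdxs p rest with _ | ⟨y, t⟩
      · rw [hx] at ih
        rw [← ih]
        rfl
      · rw [hx] at ih
        have e : ((fun x => x + 1) y :: List.map (fun x => x + 1) t)
            = List.map (fun x => x + 1) (y :: t) := rfl
        rcases hr : chLast p rest with _ | k
        · exact absurd (ih.trans hr) (chGetLast_ne_none y t)
        · rw [List.map_cons, List.getLast?_cons_cons, e, chGetLast_map, ih, hr]
          rfl
    · simp only [chIdxs, chLast, h, if_false, Bool.false_eq_true]
      rw [chGetLast_map, ih]
      rcases chLast p rest with _ | k <;> rfl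

theorem chLoopA_cfg (l : List String) (i : Nat) (les img : Option Nat) :
    (chLoopA l i les img).2.2 = (chFirst "[Configuration]" l).map (fun k => i + k + 1) := by
  induction l generalizing i les img with
  | nil => rfl
  | cons s rest ih =>
    by_cases h : PySem.Str.startswith s "[Configuration]" = true
    · simp only [chLoopA, chFirst, h, if_true, Option.map_some]
    · simp only [chLoopA, chFirst, h, if_false, Bool.false_eq_true]
      rw [ih]
      rcases chFirst "[Configuration]" rest with _ | k
      · rfl
      · simp only [Option.map_some, Option.some.injEq]
        omega

-- helper: how A's accumulators end up when the loop runs to the end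
def chUpd (o : Option Nat) (i : Nat) : Option Nat → Option Nat
  | some k => some (i + k + 1)
  | none => o

theorem chLoopA_none (l : List String) (i : Nat) (les img : Option Nat)
    (h : chFirst "[Configuration]" l = none) :
    chLoopA l i les img =
      (chUpd les i (chLast "[Lesson]" l), chUpd img i (chLast "[Images]" l), none) := by
  induction l generalizing i les img with
  | nil => rfl
  | cons s rest ih =>
    by_cases hc : PySem.Str.startswith s "[Configuration]" = true
    · rw [chFirst] at h
      rw [if_pos hc] at h
      cases h
    · rw [chFirst, if_neg hc, Option.map_eq_none_iff] at h
      simp only [chLoopA, hc, if_false, Bool.false_eq_true]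
      rw [ih _ _ _ h]
      refine Prod.ext ?_ (Prod.ext ?_ rfl)
      · simp only [chLast]
        rcases chLast "[Lesson]" rest with _ | k
        · simp only [chUpd]
          by_cases hl : PySem.Str.startswith s "[Lesson]" = true <;>
            simp only [hl, if_true, if_false, Bool.false_eq_true]
        · simp only [chUpd, Option.some.injEq]; omega
      · simp only [chLast]
        rcases chLast "[Images]" rest with _ | k
        · simp only [chUpd]
          by_cases hl : PySem.Str.startswith s "[Images]" = true <;>
            simp only [hl, if_true, if_false, Bool.false_eq_true]
        · simp only [chUpd, Option.some.injEq]; omega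

theorem chLoopHH_eq (l : List String) (i : Nat) :
    chLoopHH l i = (chFirst "## " l).map (fun k => i + k + 1) := by
  induction l generalizing i with
  | nil => rfl
  | cons s rest ih =>
    by_cases h : PySem.Str.startswith s "## " = true
    · simp only [chLoopHH, chFirst, h, if_true, Option.map_some]
    · simp only [chLoopHH, chFirst, h, if_false, Bool.false_eq_true]
      rw [ih]
      rcases chFirst "## " rest with _ | k
      · rfl
      · simp only [Option.map_some, Option.some.injEq]
        omega

theorem chFirst_eq_none (p : String) (l : List String) :
    chFirst p l = none ↔ ∀ s ∈ l, ¬ PySem.Str.startswith s p = true := by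
  induction l with
  | nil => simp [chFirst]
  | cons s rest ih =>
    by_cases h : PySem.Chars.startswith s.toList p.toList = true <;> simp [chFirst, h, ih]

theorem chLast_eq_none (p : String) (l : List String) :
    chLast p l = none ↔ ∀ s ∈ l, ¬ PySem.Str.startswith s p = true := by
  induction l with
  | nil => simp [chLast]
  | cons s rest ih =>
    rcases hr : chLast p rest with _ | k
    · simp only [chLast, hr]
      by_cases h : PySem.Str.startswith s p = true
      · rw [if_pos h]
        constructor
        · intro hcon; cases hcon
        · intro hall; exact absurd h (hall s (by simp))
      · rw [if_neg h]
        constructor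
        · intro _ x hx
          rcases List.mem_cons.mp hx with rfl | hx'
          · exact h
          · exact (ih.mp hr) x hx'
        · intro _; rfl
    · simp only [chLast, hr]
      constructor
      · intro hcon; cases hcon
      · intro hall
        exact absurd (ih.mpr fun x hx => hall x (List.mem_cons_of_mem _ hx))
          (by simp [hr])

theorem chHits_head (l : List String) (p : String) :
    (chHits l p).head? = (chFirst p l).map (fun k : Nat => (k : Int)) := by
  rw [chHits, chHits_eq l p 0, List.head?_map, chIdxs_head]
  cases chFirst p l <;> simp

theorem chHits_last (l : List String) (p : String) :
    (chHits l p).getLast? = (chLast p l).map (fun k : Nat => (k : Int)) := by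
  rw [chHits, chHits_eq l p 0, List.getLast?_map, chIdxs_last]
  cases chLast p l <;> simp

theorem ch_slice (l : List String) (k : Nat) :
    PySem.List.slice l (some ((k : Int) + 2)) none = l.drop (k + 2) := by
  have h : ((k : Int) + 2) = ((k + 2 : Nat) : Int) := by push_cast; ring
  rw [h, PySem.List.slice_from_natCast]

-- ===== VERDICT (by name: the statement is the Claim_ definition above) =====
theorem clean_header_spec : Claim_equal_clean_header := by
  intro fList _ hpre
  unfold Spec_clean_header clean_header clean_header_alt
  rcases hc : chFirst "[Configuration]" fList with _ | c
  · have h2 := chLoopA_none fList 0 none none hc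
    rw [h2]
    rw [chHits_head fList "[Configuration]", hc]
    rcases hi : chLast "[Images]" fList with _ | m
    · rcases hl : chLast "[Lesson]" fList with _ | m
      · rcases hh : chFirst "## " fList with _ | c2
        · exfalso
          rw [chFirst_eq_none] at hc hh
          rw [chLast_eq_none] at hi hl
          unfold Pre_clean_header at hpre
          simp only [List.any_eq_true, Bool.or_eq_true] at hpre
          obtain ⟨s, hs, hor⟩ := hpre
          rcases hor with ((h | h) | h) | h
          · exact hc s hs h
          · exact hi s hs h
          · exact hl s hs h
          · exact hh s hs h
        · rw [chHits_last fList "[Images]", hi, chHits_last fList "[Lesson]", hl,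
              chHits_head fList "## ", hh, chLoopHH_eq fList 0, hh]
          simp only [chUpd, Option.map_some, ch_slice]
          congr 1
          omega
      · rw [chHits_last fList "[Images]", hi, chHits_last fList "[Lesson]", hl]
        simp only [chUpd, Option.map_some, ch_slice]
        congr 1
        omega
    · rw [chHits_last fList "[Images]", hi]
      simp only [chUpd, Option.map_some, ch_slice]
      congr 1
      omega
  · have h2 := chLoopA_cfg fList 0 none none
    rw [hc] at h2
    rcases h3 : chLoopA fList 0 none none with ⟨les, img, cfg⟩
    rw [h3] at h2
    simp only at h2
    rw [h2]
    rw [chHits_head fList "[Configuration]", hc]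
    simp only [Option.map_some, ch_slice]
    congr 1
    omega
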